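-- pv_equiv track=rewrite | github.com/T-R0D/JustForFun | aoc2018/aoc2018/day07/solution.py | determine_construction_time
-- ===== SOURCE A (Python) =====
-- import collections
-- import heapq
--
-- def reverse_dependencies(dependencies):
--     reversed_dependencies = {}
--     for step, dependent_steps in dependencies.items():
--         if step not in reversed_dependencies:
--             reversed_dependencies[step] = set()
--
--         for dependent_step in dependent_steps:
--             reversed_dependencies[dependent_step] = reversed_dependencies.get(
--                 dependent_step, set()
--             ) | {step}
--
--     return reversed_dependencies
--
-- def find_start_labels(reversed_dependencies):
--     candidates = []
--     for step, previous_steps in reversed_dependencies.items():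
--         if not previous_steps:
--             candidates.append(step)
--
--     return candidates
--
-- def determine_construction_time(dependencies, n_workers, step_startup_cost):
--     reversed_dependencies = reverse_dependencies(dependencies)
--
--     available_workers = collections.deque(x for x in range(n_workers))
--
--     remaining_steps = find_start_labels(reversed_dependencies)
--     heapq.heapify(remaining_steps)
--
--     current_work_queue = []
--
--     current_time = 0
--
--     def step_construction_time(label):
--         return ord(label) - ord("A") + 1 + step_startup_cost
--
--     while remaining_steps or current_work_queue:
--         while remaining_steps and available_workers:
--             next_worker = available_workers.pop()
--             next_step = heapq.heappop(remaining_steps)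
--             start_time = current_time
--             completion_time = current_time + step_construction_time(next_step)
--             heapq.heappush(
--                 current_work_queue,
--                 (completion_time, start_time, next_step, next_worker),
--             )
--
--         current_time, start_time, step, worker = heapq.heappop(current_work_queue)
--
--         available_workers.appendleft(worker)
--
--         for next_step in dependencies[step]:
--             reversed_dependencies[next_step].discard(step)
--
--             if reversed_dependencies[next_step]:
--                 continue
--
--             heapq.heappush(remaining_steps, next_step)
--
--     return current_time
-- ===== SOURCE B (Python) =====
-- def determine_construction_time(dependencies, n_workers, step_startup_cost):
--     # Batch scheduler: build the blocker map inline, keep ready unsorted and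
--     # start whole batches via sorted(ready)[:free]; jobs run as plain triples
--     # whose minimum is taken with min(); only a count of idle workers is kept.
--     pending = {}
--     for step, succs in dependencies.items():
--         pending.setdefault(step, set())
--         for succ in succs:
--             pending.setdefault(succ, set()).add(step)
--
--     ready = [s for s, blockers in pending.items() if not blockers]
--     running = []
--     free = n_workers if n_workers > 0 else 0
--     t = 0
--
--     while ready or running:
--         queue = sorted(ready)
--         k = min(free, len(queue))
--         for s in queue[:k]:
--             running.append((t + ord(s) - ord("A") + 1 + step_startup_cost, t, s))
--         ready = queue[k:]
--         free -= k
--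
--         job = min(running)
--         running.remove(job)
--         t, _, s = job
--         free += 1
--
--         for succ in dependencies[s]:
--             blockers = pending[succ]
--             blockers.discard(s)
--             if not blockers:
--                 ready.append(succ)
--
--     return t
-- ===== Notes on version B (the rewrite author's own statement) =====
-- stated objective: simpler
-- what changed: B replaces A's incremental heap scheduling (heapq heaps, worker-id deque, reverse_dependencies/find_start_labels helpers) by batch scheduling: per round it sorts the ready list once and starts the whole slice sorted(ready)[:free] at once, keeps running jobs as plain triples extracted with min(), and tracks only a count of idle workers.
import Mathlib
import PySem

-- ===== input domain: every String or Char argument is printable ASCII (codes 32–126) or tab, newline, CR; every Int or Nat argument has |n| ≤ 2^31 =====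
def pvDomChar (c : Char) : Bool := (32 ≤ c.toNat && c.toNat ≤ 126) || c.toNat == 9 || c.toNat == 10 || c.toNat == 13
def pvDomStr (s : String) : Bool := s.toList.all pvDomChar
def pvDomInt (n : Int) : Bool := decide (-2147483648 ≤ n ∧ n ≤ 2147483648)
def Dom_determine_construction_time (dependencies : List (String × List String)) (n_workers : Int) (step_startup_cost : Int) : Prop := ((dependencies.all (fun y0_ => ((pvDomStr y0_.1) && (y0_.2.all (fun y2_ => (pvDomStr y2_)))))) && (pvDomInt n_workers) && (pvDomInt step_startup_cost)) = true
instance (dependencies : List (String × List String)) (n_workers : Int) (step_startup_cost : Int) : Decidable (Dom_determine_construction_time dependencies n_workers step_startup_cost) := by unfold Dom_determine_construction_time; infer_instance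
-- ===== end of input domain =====

-- B replaces A's incremental heap scheduling (two heapq heaps, a deque of worker ids,
-- two helper functions) by batch scheduling: each round sorts the ready list once and
-- starts the whole slice sorted(ready)[:free], keeps running jobs as plain triples
-- extracted with min(), and tracks only a count of idle workers; objective: simpler.

-- Shared small helper: Python ord(label) for the single-character labels Pre_ admits
-- (on other strings Python raises TypeError — outside Pre_; the port returns 0 there).
def pvOrd (s : String) : Int :=
  match s.toList with
  | [c] => (c.toNat : Int)
  | _ => 0

-- Python tuple '<' is the lexicographic comparison of the components: exactly the
-- Prod.Lex order on the corresponding ×ₗ products.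
def pvKey4 (x : Int × Int × String × Int) : Int ×ₗ Int ×ₗ String ×ₗ Int :=
  toLex (x.1, toLex (x.2.1, toLex (x.2.2.1, x.2.2.2)))
def pvKey3 (x : Int × Int × String) : Int ×ₗ Int ×ₗ String :=
  toLex (x.1, toLex (x.2.1, x.2.2))
abbrev pvLt4 (a b : Int × Int × String × Int) : Prop := pvKey4 a < pvKey4 b
abbrev pvLt3 (a b : Int × Int × String) : Prop := pvKey3 a < pvKey3 b

-- ===== PORT A =====

-- ordered insert: the model of heapq.heappush on the heap-as-sorted-list model of A's heaps
def pvInsort {α : Type} (lt : α → α → Prop) [DecidableRel lt] (x : α) : List α → List α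
  | [] => [x]
  | y :: ys => if lt y x then y :: pvInsort lt x ys else x :: y :: ys

def pvReverseDeps (deps : List (String × List String)) : PySem.Dict String (PySem.Set String) :=
  deps.foldl (fun rd p =>
    let rd := if PySem.Dict.contains rd p.1 then rd else PySem.Dict.insert rd p.1 PySem.Set.empty
    -- reversed[d] = reversed.get(d, set()) | {step} : the union with a singleton is Set.add
    p.2.foldl (fun rd d =>
      PySem.Dict.insert rd d (PySem.Set.add (PySem.Dict.getD rd d PySem.Set.empty) p.1)) rd)
    PySem.Dict.empty

def pvStartLabels (rd : PySem.Dict String (PySem.Set String)) : List String :=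
  rd.items.foldl (fun acc p => if p.2 = ([] : List String) then acc ++ [p.1] else acc) []

-- inner 'while remaining_steps and available_workers' loop: pop worker from the right,
-- pop the least label (head of the sorted list modelling the heap), push the 4-tuple
def pvAssignA (cost time : Int) (workers : List Int) (ready : List String)
    (queue : List (Int × Int × String × Int)) :
    List Int × List String × List (Int × Int × String × Int) :=
  match ready with
  | [] => (workers, [], queue)
  | s :: rest =>
    match workers.getLast? with
    | none => (workers, s :: rest, queue)
    | some w =>
      pvAssignA cost time workers.dropLast rest
        (pvInsort pvLt4 (time + (pvOrd s - 65 + 1 + cost), time, s, w) queue)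

-- 'for next_step in dependencies[step]: …' — discard the finished step, push newly-free labels
def pvReleaseA (step : String) (succs : List String)
    (rd : PySem.Dict String (PySem.Set String)) (ready : List String) :
    PySem.Dict String (PySem.Set String) × List String :=
  succs.foldl (fun st nxt =>
    -- reversed_dependencies[next_step].discard(step); KeyError if absent is outside Pre_
    let rd := PySem.Dict.modify st.1 nxt PySem.Set.empty (fun s => PySem.Set.discard s step)
    if PySem.Dict.getD rd nxt PySem.Set.empty = ([] : PySem.Set String) then
      (rd, pvInsort (fun a b : String => a < b) nxt st.2)
    else (rd, st.2)) (rd, ready)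

def pvFuel (deps : List (String × List String)) : Nat :=
  -- any bound on the number of completions; ample even for duplicate-successor blowup
  let k := deps.length
  let e := (deps.map (fun p => p.2.length)).sum
  (e + 2) ^ (k + 1) + k + e + 2

def pvLoopA (deps : List (String × List String)) (cost : Int) :
    Nat → List Int → List String → List (Int × Int × String × Int) →
    PySem.Dict String (PySem.Set String) → Int → Int
  | 0, _, _, _, _, time => time
  | fuel + 1, workers, ready, queue, rd, time =>
    if ready = [] ∧ queue = [] then time
    else
      match pvAssignA cost time workers ready queue with
      | (workers, ready, queue) =>
        match queue with
        | [] => time  -- Python: heappop of an empty list raises IndexError; outside Pre_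
        | (ct, _st, step, w) :: qrest =>
          -- dependencies[step]: KeyError if absent is outside Pre_ (getD [] is the total form)
          match pvReleaseA step (PySem.Dict.getD ⟨deps⟩ step []) rd ready with
          | (rd, ready) => pvLoopA deps cost fuel (w :: workers) ready qrest rd ct

def determine_construction_time (dependencies : List (String × List String)) (n_workers : Int) (step_startup_cost : Int) : Int :=
  let rd := pvReverseDeps dependencies
  let workers := PySem.List.pyRange 0 n_workers 1   -- deque(x for x in range(n_workers))
  let ready := (pvStartLabels rd).foldl (fun acc x => pvInsort (fun a b : String => a < b) x acc) []
    -- heapq.heapify, on the heap-as-sorted-list model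
  pvLoopA dependencies step_startup_cost (pvFuel dependencies) workers ready [] rd 0

-- ===== PORT B =====

def pvPreds (deps : List (String × List String)) : PySem.Dict String (PySem.Set String) :=
  deps.foldl (fun pr p =>
    let pr := PySem.Dict.setdefault pr p.1 PySem.Set.empty
    -- pending.setdefault(succ, set()).add(step): ensure the key, then mutate the set in place
    p.2.foldl (fun pr s =>
      PySem.Dict.modify (PySem.Dict.setdefault pr s PySem.Set.empty) s PySem.Set.empty
        (fun t => PySem.Set.add t p.1)) pr)
    PySem.Dict.empty

-- the completion-time triple appended for a started label s
def pvTrip (cost t : Int) (s : String) : Int × Int × String :=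
  (t + (pvOrd s - 65 + 1 + cost), t, s)

-- Python min(running) on triples: lexicographic tuple '<', FIRST extremal element.
-- Ported by hand (exact): PySem.List.min? with a tuple-valued key would use the
-- pointwise pair order, not Python's lexicographic one.
def pvPyMin3 : List (Int × Int × String) → Option (Int × Int × String)
  | [] => none
  | x :: rest => some (rest.foldl (fun m y => if pvLt3 y m then y else m) x)

-- 'for succ in dependencies[s]: blockers = pending[succ]; blockers.discard(s); if not blockers: ready.append(succ)'
def pvReleaseB (step : String) (succs : List String)
    (pr : PySem.Dict String (PySem.Set String)) (ready : List String) :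
    PySem.Dict String (PySem.Set String) × List String :=
  succs.foldl (fun st nxt =>
    let pr := PySem.Dict.modify st.1 nxt PySem.Set.empty (fun s => PySem.Set.discard s step)
    if PySem.Dict.getD pr nxt PySem.Set.empty = ([] : PySem.Set String) then
      (pr, st.2 ++ [nxt])
    else (pr, st.2)) (pr, ready)

def pvLoopB (deps : List (String × List String)) (cost : Int) :
    Nat → Int → List String → List (Int × Int × String) →
    PySem.Dict String (PySem.Set String) → Int → Int
  | 0, _, _, _, _, t => t
  | fuel + 1, free, ready, running, pending, t =>
    if ready = [] ∧ running = [] then t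
    else
      let queue := PySem.List.sorted ready (fun s => s) false   -- sorted(ready)
      let k := min free (queue.length : Int)
      -- 'for s in queue[:k]: running.append(trip s)' appends the mapped slice
      let running := running ++ (PySem.List.slice queue none (some k)).map (pvTrip cost t)
      let ready := PySem.List.slice queue (some k) none          -- queue[k:]
      let free := free - k
      match pvPyMin3 running with
      | none => t  -- Python: min(()) raises ValueError; outside Pre_
      | some job =>
        match pvReleaseB job.2.2 (PySem.Dict.getD ⟨deps⟩ job.2.2 []) pending ready with
        | (pending, ready) =>
          pvLoopB deps cost fuel (free + 1) ready
            ((PySem.List.remove? running job).getD running) pending job.1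

def determine_construction_time_alt (dependencies : List (String × List String)) (n_workers : Int) (step_startup_cost : Int) : Int :=
  let pending := pvPreds dependencies
  let ready := (pending.items.filter (fun p => p.2.isEmpty)).map Prod.fst
  pvLoopB dependencies step_startup_cost (pvFuel dependencies)
    (if n_workers > 0 then n_workers else 0) ready [] pending 0

-- ===== PRECONDITION & SPEC =====

-- The labels that can ever be scheduled: the least set of names whose (deduplicated)
-- predecessors all lie in the set — read off the dependency graph, not a run of the algorithm.
def pvAllNames (deps : List (String × List String)) : List String :=
  PySem.List.dedup (deps.map Prod.fst ++ deps.flatMap (fun p => p.2))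
def pvPredsOf (deps : List (String × List String)) (s : String) : List String :=
  (deps.filter (fun q => decide (s ∈ q.2))).map Prod.fst
def pvClosure (deps : List (String × List String)) : List String :=
  (List.range ((pvAllNames deps).length + 1)).foldl
    (fun C _ => (pvAllNames deps).filter
      (fun s => (pvPredsOf deps s).all (fun p => decide (p ∈ C)))) []

-- Pre_ excludes exactly the inputs on which the Python A raises, plus one unrepresentable
-- corner: association lists with duplicate keys (no Python dict represents them).  A raises
-- iff some schedulable label (a member of pvClosure) is not a single character (ord raises
-- TypeError when it starts) or is not a key of dependencies (dependencies[step] raises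
-- KeyError when it finishes), or some label is schedulable while n_workers < 1 (the pop of
-- the empty work queue raises IndexError).
def Pre_determine_construction_time (dependencies : List (String × List String)) (n_workers : Int) (step_startup_cost : Int) : Prop :=
  (dependencies.map Prod.fst).Nodup ∧
  (∀ s ∈ pvClosure dependencies, s.length = 1 ∧ s ∈ dependencies.map Prod.fst) ∧
  (pvClosure dependencies ≠ [] → 1 ≤ n_workers)
instance (dependencies : List (String × List String)) (n_workers : Int) (step_startup_cost : Int) : Decidable (Pre_determine_construction_time dependencies n_workers step_startup_cost) := by unfold Pre_determine_construction_time; infer_instance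

def pvWitness_determine_construction_time : (List (String × List String)) × Int × Int :=
  ([("A", ["B", "C"]), ("B", ["C"]), ("C", [])], 2, 3)

def Spec_determine_construction_time (dependencies : List (String × List String)) (n_workers : Int) (step_startup_cost : Int) (out : Int) : Prop := out = determine_construction_time_alt dependencies n_workers step_startup_cost
instance (dependencies : List (String × List String)) (n_workers : Int) (step_startup_cost : Int) (out : Int) : Decidable (Spec_determine_construction_time dependencies n_workers step_startup_cost out) := by unfold Spec_determine_construction_time; infer_instance

-- ===== CLAIM (what is proved, stated in full; the proofs are below) =====
def Claim_equal_determine_construction_time : Prop := ∀ (dependencies : List (String × List String)) (n_workers : Int) (step_startup_cost : Int), Dom_determine_construction_time dependencies n_workers step_startup_cost → Pre_determine_construction_time dependencies n_workers step_startup_cost → Spec_determine_construction_time dependencies n_workers step_startup_cost (determine_construction_time dependencies n_workers step_startup_cost)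

-- ===== LEMMAS AND PROOFS =====

-- --- order facts for the Python comparisons ---

theorem pvLtS_asymm (a b : String) : a < b → ¬ b < a := fun h h2 => absurd h (asymm h2)
theorem pvLtS_cotrans (a b c : String) : a < c → a < b ∨ b < c := by
  intro h1
  rcases lt_or_ge a b with h | h
  · exact Or.inl h
  · exact Or.inr (lt_of_le_of_lt h h1)

theorem pvLt4_asymm (a b : Int × Int × String × Int) : pvLt4 a b → ¬ pvLt4 b a :=
  fun h => lt_asymm h

theorem pvLt4_cotrans (a b c : Int × Int × String × Int) : pvLt4 a c → pvLt4 a b ∨ pvLt4 b c := by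
  intro h
  rcases lt_or_ge (pvKey4 a) (pvKey4 b) with h1 | h1
  · exact Or.inl h1
  · exact Or.inr (lt_of_le_of_lt h1 h)

theorem pvLt3_asymm (a b : Int × Int × String) : pvLt3 a b → ¬ pvLt3 b a :=
  fun h => lt_asymm h

theorem pvLt3_trans (a b c : Int × Int × String) : pvLt3 a b → pvLt3 b c → pvLt3 a c :=
  lt_trans

theorem pvLt3_cotrans (a b c : Int × Int × String) : pvLt3 a c → pvLt3 a b ∨ pvLt3 b c := by
  intro h
  rcases lt_or_ge (pvKey3 a) (pvKey3 b) with h1 | h1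
  · exact Or.inl h1
  · exact Or.inr (lt_of_le_of_lt h1 h)

theorem pvKey3_inj : Function.Injective pvKey3 := by
  rintro ⟨a1, a2, a3⟩ ⟨b1, b2, b3⟩ h
  simp only [pvKey3, toLex_inj, Prod.mk.injEq] at h
  obtain ⟨rfl, rfl, rfl⟩ := h
  rfl

theorem pvLt3_conn (a b : Int × Int × String) : ¬ pvLt3 a b → ¬ pvLt3 b a → a = b := by
  intro h1 h2
  exact pvKey3_inj (le_antisymm (not_lt.mp h2) (not_lt.mp h1))

def pvProj (x : Int × Int × String × Int) : Int × Int × String := (x.1, x.2.1, x.2.2.1)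

theorem pvLt3_proj (a b : Int × Int × String × Int) :
    pvLt3 (pvProj a) (pvProj b) → pvLt4 a b := by
  simp only [pvLt3, pvLt4, pvKey3, pvKey4, pvProj, Prod.Lex.toLex_lt_toLex]
  tauto

theorem pvInsort_perm {α : Type} (lt : α → α → Prop) [DecidableRel lt] (x : α) (l : List α) :
    (pvInsort lt x l).Perm (x :: l) := by
  induction l with
  | nil => simp [pvInsort]
  | cons y ys ih =>
      simp only [pvInsort]
      split
      · exact ((ih.cons y).trans (List.Perm.swap x y ys))
      · exact List.Perm.refl _

theorem pvInsort_pairwise {α : Type} (lt : α → α → Prop) [DecidableRel lt]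
    (hasym : ∀ a b, lt a b → ¬ lt b a) (hco : ∀ a b c, lt a c → lt a b ∨ lt b c)
    (x : α) (l : List α) (hl : l.Pairwise (fun a b => ¬ lt b a)) :
    (pvInsort lt x l).Pairwise (fun a b => ¬ lt b a) := by
  induction l with
  | nil => simp [pvInsort]
  | cons y ys ih =>
      rcases hl with _ | ⟨hy, hys⟩
      simp only [pvInsort]
      split
      · rename_i hyx
        refine List.Pairwise.cons ?_ (ih hys)
        intro z hz
        have hz' : z ∈ x :: ys := (pvInsort_perm lt x ys).mem_iff.mp hz
        rcases List.mem_cons.mp hz' with rfl | hz'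
        · exact hasym _ _ hyx
        · exact hy z hz'
      · rename_i hyx
        refine List.Pairwise.cons ?_ (List.Pairwise.cons hy hys)
        intro z hz
        rcases List.mem_cons.mp hz with rfl | hz
        · exact hyx
        · intro hzx
          rcases hco z y x hzx with h | h
          · exact hy z hz h
          · exact hyx h

theorem pvMinFold_spec :
    ∀ (rest : List (Int × Int × String)) (x : Int × Int × String),
      (rest.foldl (fun m y => if pvLt3 y m then y else m) x) ∈ x :: rest ∧
      ∀ y ∈ x :: rest, ¬ pvLt3 y (rest.foldl (fun m y => if pvLt3 y m then y else m) x) := by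
  intro rest
  induction rest with
  | nil =>
      intro x
      refine ⟨List.mem_cons_self, ?_⟩
      intro y hy
      rcases List.mem_cons.mp hy with h1 | h1
      · rw [h1]; exact fun h => pvLt3_asymm _ _ h h
      · simp at h1
  | cons y rest ih =>
      intro x
      simp only [List.foldl_cons]
      obtain ⟨hmem, hmin⟩ := ih (if pvLt3 y x then y else x)
      refine ⟨?_, ?_⟩
      · rcases List.mem_cons.mp hmem with h1 | h1
        · rw [h1]; split
          · exact List.mem_cons_of_mem _ List.mem_cons_self
          · exact List.mem_cons_self
        · exact List.mem_cons_of_mem _ (List.mem_cons_of_mem _ h1)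
      · intro z hz
        rcases List.mem_cons.mp hz with h1 | h1
        · rw [h1]
          by_cases hyx : pvLt3 y x
          · intro hxm
            have hym := hmin y (by rw [if_pos hyx]; exact List.mem_cons_self)
            exact hym (pvLt3_trans _ _ _ hyx hxm)
          · exact hmin x (by rw [if_neg hyx]; exact List.mem_cons_self)
        · rcases List.mem_cons.mp h1 with h2 | h2
          · rw [h2]
            by_cases hyx : pvLt3 y x
            · exact hmin y (by rw [if_pos hyx]; exact List.mem_cons_self)
            · intro hym
              rcases pvLt3_cotrans y x _ hym with hc | hc
              · exact hyx hc
              · exact hmin x (by rw [if_neg hyx]; exact List.mem_cons_self) hc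
          · exact hmin z (List.mem_cons_of_mem _ h2)

theorem pvPyMin3_of_perm_sorted (l : List (Int × Int × String)) (h : Int × Int × String)
    (t : List (Int × Int × String)) (hperm : l.Perm (h :: t))
    (hsorted : (h :: t).Pairwise (fun a b => ¬ pvLt3 b a)) :
    pvPyMin3 l = some h := by
  match l with
  | [] => exact absurd hperm.symm (by simp)
  | x :: rest =>
    simp only [pvPyMin3]
    obtain ⟨hmem, hmin⟩ := pvMinFold_spec rest x
    set m := rest.foldl (fun m y => if pvLt3 y m then y else m) x with hm
    have hmem' : m ∈ h :: t := hperm.mem_iff.mp hmem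
    have h1 : ¬ pvLt3 m h := by
      rcases List.mem_cons.mp hmem' with rfl | hmem'
      · exact fun hc => pvLt3_asymm _ _ hc hc
      · rcases hsorted with _ | ⟨hh, _⟩
        exact hh m hmem'
    have h2 : ¬ pvLt3 h m := hmin h (hperm.symm.mem_iff.mp List.mem_cons_self)
    rw [pvLt3_conn m h h1 h2]

-- --- the simulation ---

-- A's assignment loop, characterised: with ready sorted it starts the k = min(#workers, #ready)
-- smallest labels, leaving ready.drop k, k fewer workers, and the k projected triples merged
-- into the (still sorted) work queue.
theorem pvAssignA_spec (cost t : Int) :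
    ∀ (ready : List String) (workers : List Int) (queue : List (Int × Int × String × Int)),
      queue.Pairwise (fun a b => ¬ pvLt4 b a) →
      ∃ w' q',
        pvAssignA cost t workers ready queue =
          (w', ready.drop (min workers.length ready.length), q') ∧
        w'.length = workers.length - min workers.length ready.length ∧
        q'.Pairwise (fun a b => ¬ pvLt4 b a) ∧
        (q'.map pvProj).Perm
          ((ready.take (min workers.length ready.length)).map (pvTrip cost t) ++
            queue.map pvProj) := by
  intro ready
  induction ready with
  | nil =>
      intro workers queue hq
      exact ⟨workers, queue, by simp [pvAssignA], by simp, hq, by simp⟩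
  | cons s rest ih =>
      intro workers queue hq
      cases hw : workers.getLast? with
      | none =>
          have hwnil : workers = [] := List.getLast?_eq_none_iff.mp hw
          subst hwnil
          exact ⟨[], queue, by simp [pvAssignA, hw], by simp, hq, by simp⟩
      | some w =>
          have hwne : workers ≠ [] := by intro h; subst h; simp at hw
          have hlen : 0 < workers.length := List.length_pos_iff.mpr hwne
          have hq' : (pvInsort pvLt4 (t + (pvOrd s - 65 + 1 + cost), t, s, w) queue).Pairwise
              (fun a b => ¬ pvLt4 b a) :=
            pvInsort_pairwise pvLt4 pvLt4_asymm pvLt4_cotrans _ _ hq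
          obtain ⟨w', q', heq, hlen', hq'', hperm⟩ := ih workers.dropLast _ hq'
          have hd : workers.dropLast.length = workers.length - 1 := List.length_dropLast
          have hk : min workers.length (s :: rest).length =
              min workers.dropLast.length rest.length + 1 := by
            simp only [List.length_cons, hd]; omega
          refine ⟨w', q', ?_, ?_, hq'', ?_⟩
          · rw [show pvAssignA cost t workers (s :: rest) queue =
                pvAssignA cost t workers.dropLast rest
                  (pvInsort pvLt4 (t + (pvOrd s - 65 + 1 + cost), t, s, w) queue) by
              simp [pvAssignA, hw]]
            rw [heq, hk]
            simp
          · rw [hlen', hk, hd]; omega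
          · rw [hk]
            simp only [List.take_succ_cons, List.map_cons]
            refine hperm.trans ?_
            have hins : ((pvInsort pvLt4 (t + (pvOrd s - 65 + 1 + cost), t, s, w) queue).map
                pvProj).Perm (pvTrip cost t s :: queue.map pvProj) := by
              have := (pvInsort_perm pvLt4 (t + (pvOrd s - 65 + 1 + cost), t, s, w) queue).map pvProj
              simpa [pvProj, pvTrip] using this
            refine (List.Perm.append_left _ hins).trans ?_
            exact List.perm_middle

theorem pvRelease_sim (step : String) :
    ∀ (succs : List String) (rd : PySem.Dict String (PySem.Set String))
      (ready readyB : List String),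
      ready.Pairwise (fun a b : String => ¬ b < a) → readyB.Perm ready →
      (pvReleaseB step succs rd readyB).1 = (pvReleaseA step succs rd ready).1 ∧
      (pvReleaseA step succs rd ready).2.Pairwise (fun a b : String => ¬ b < a) ∧
      (pvReleaseB step succs rd readyB).2.Perm (pvReleaseA step succs rd ready).2 := by
  intro succs
  induction succs with
  | nil =>
      intro rd ready readyB hs hp
      exact ⟨rfl, hs, hp⟩
  | cons nxt succs ih =>
      intro rd ready readyB hs hp
      have hA : pvReleaseA step (nxt :: succs) rd ready =
          pvReleaseA step succs
            (PySem.Dict.modify rd nxt PySem.Set.empty (fun s => PySem.Set.discard s step))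
            (if PySem.Dict.getD (PySem.Dict.modify rd nxt PySem.Set.empty
                  (fun s => PySem.Set.discard s step)) nxt PySem.Set.empty = ([] : PySem.Set String)
             then pvInsort (fun a b : String => a < b) nxt ready else ready) := by
        simp only [pvReleaseA, List.foldl_cons]
        split <;> rfl
      have hB : pvReleaseB step (nxt :: succs) rd readyB =
          pvReleaseB step succs
            (PySem.Dict.modify rd nxt PySem.Set.empty (fun s => PySem.Set.discard s step))
            (if PySem.Dict.getD (PySem.Dict.modify rd nxt PySem.Set.empty
                  (fun s => PySem.Set.discard s step)) nxt PySem.Set.empty = ([] : PySem.Set String)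
             then readyB ++ [nxt] else readyB) := by
        simp only [pvReleaseB, List.foldl_cons]
        split <;> rfl
      rw [hA, hB]
      split
      · apply ih
        · exact pvInsort_pairwise _ pvLtS_asymm pvLtS_cotrans nxt ready hs
        · refine (List.perm_append_singleton _ _).trans ?_
          exact ((hp.cons nxt).trans (pvInsort_perm _ nxt ready).symm)
      · exact ih _ ready readyB hs hp

theorem pvLoop_sim (deps : List (String × List String)) (cost : Int) :
    ∀ (fuel : Nat) (workers : List Int) (ready : List String)
      (queue : List (Int × Int × String × Int)) (rd : PySem.Dict String (PySem.Set String))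
      (free : Int) (readyB : List String) (running : List (Int × Int × String)) (t : Int),
      free = (workers.length : Int) →
      ready.Pairwise (fun a b : String => ¬ b < a) →
      readyB.Perm ready →
      queue.Pairwise (fun a b => ¬ pvLt4 b a) →
      running.Perm (queue.map pvProj) →
      pvLoopA deps cost fuel workers ready queue rd t =
        pvLoopB deps cost fuel free readyB running rd t := by
  intro fuel
  induction fuel with
  | zero => intros; rfl
  | succ fuel ih =>
      intro workers ready queue rd free readyB running t hf hsorted hperm hq hrun
      simp only [pvLoopA, pvLoopB]
      by_cases hc : ready = [] ∧ queue = []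
      · have hcB : readyB = [] ∧ running = [] := by
          obtain ⟨h1, h2⟩ := hc
          subst h1; subst h2
          exact ⟨hperm.eq_nil, by simpa using hrun.eq_nil⟩
        rw [if_pos hc, if_pos hcB]
      · have hcB : ¬ (readyB = [] ∧ running = []) := by
          intro ⟨h1, h2⟩
          apply hc
          subst h1; subst h2
          refine ⟨hperm.symm.eq_nil, ?_⟩
          have := hrun.symm.eq_nil
          simpa using this
        rw [if_neg hc, if_neg hcB]
        -- sorted(readyB) is exactly A's sorted ready list
        have hle : ready.Pairwise (fun a b : String => a ≤ b) :=
          hsorted.imp (fun h => not_lt.mp h)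
        have hsortB : PySem.List.sorted readyB (fun s => s) false = ready :=
          PySem.List.sorted_id_eq_of_perm_of_pairwise readyB ready hperm.symm hle
        rw [hsortB]
        -- the batch size
        have hkeq : min free (ready.length : Int) =
            ((min workers.length ready.length : Nat) : Int) := by
          rw [hf]; omega
        have hk0 : (0:Int) ≤ min free (ready.length : Int) := by rw [hkeq]; positivity
        have htoNat : (min free (ready.length : Int)).toNat =
            min workers.length ready.length := by rw [hkeq]; omega
        rw [PySem.List.slice_to _ hk0, PySem.List.slice_from _ hk0, htoNat]
        -- A's assignment phase
        obtain ⟨w', q', hA, hlen', hq', hpermq⟩ := pvAssignA_spec cost t ready workers queue hq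
        rw [hA]
        set k := min workers.length ready.length with hkdef
        have hrun' : (running ++ (ready.take k).map (pvTrip cost t)).Perm (q'.map pvProj) := by
          refine ((hrun.append_right _).trans ?_).trans hpermq.symm
          exact List.perm_append_comm
        match hq'' : q' with
        | [] =>
            have hnil : running ++ (ready.take k).map (pvTrip cost t) = [] := by
              subst hq''; simpa using hrun'.eq_nil
            rw [hnil]
            rfl
        | (ct, st, stp, w) :: qrest =>
            subst hq''
            have hsorted3 : ((((ct, st, stp, w) : Int × Int × String × Int) :: qrest).map
                pvProj).Pairwise (fun a b => ¬ pvLt3 b a) :=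
              hq'.map _ (fun {a b} h hab => h (pvLt3_proj _ _ hab))
            have hmin3 : pvPyMin3 (running ++ (ready.take k).map (pvTrip cost t)) =
                some (pvProj (ct, st, stp, w)) := by
              apply pvPyMin3_of_perm_sorted _ _ (qrest.map pvProj)
              · simpa using hrun'
              · simpa using hsorted3
            rw [hmin3]
            have hmem3 : pvProj (ct, st, stp, w) ∈ running ++ (ready.take k).map (pvTrip cost t) :=
              hrun'.mem_iff.mpr (by simp)
            have hrm3 : PySem.List.remove? (running ++ (ready.take k).map (pvTrip cost t))
                (pvProj (ct, st, stp, w)) =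
                some ((running ++ (ready.take k).map (pvTrip cost t)).erase
                  (pvProj (ct, st, stp, w))) :=
              PySem.List.remove?_eq_some_erase _ _ hmem3
            have hdropsorted : (ready.drop k).Pairwise (fun a b : String => ¬ b < a) :=
              hsorted.sublist (List.drop_sublist k ready)
            obtain ⟨hRd, hRs, hRp⟩ := pvRelease_sim stp
              (PySem.Dict.getD ⟨deps⟩ stp []) rd (ready.drop k) (ready.drop k)
              hdropsorted (List.Perm.refl _)
            rcases hRA : pvReleaseA stp (PySem.Dict.getD ⟨deps⟩ stp []) rd (ready.drop k)
              with ⟨rd1, ready1⟩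
            rcases hRB : pvReleaseB stp (PySem.Dict.getD ⟨deps⟩ stp []) rd (ready.drop k)
              with ⟨rd1', ready1'⟩
            rw [hRA] at hRd hRs hRp
            rw [hRB] at hRd hRp
            simp only at hRd hRs hRp
            simp only [pvProj] at hmin3 hrm3
            dsimp only
            simp only [pvProj]
            rw [hRA, hRB, hrm3, Option.getD_some, hRd]
            apply ih
            · simp only [List.length_cons, hlen', hkeq]
              push_cast
              omega
            · exact hRs
            · exact hRp
            · exact (List.pairwise_cons.mp hq').2
            · have := hrun'.erase (pvProj (ct, st, stp, w))
              rw [List.map_cons, List.erase_cons_head] at this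
              simpa [pvProj] using this

-- --- the two dicts and the two initial ready lists coincide ---

theorem pvContains_false_forall {ν : Type} (d : PySem.Dict String ν) (k : String)
    (h : PySem.Dict.contains d k = false) : ∀ p ∈ d.items, ¬ (p.1 == k) = true := by
  simpa [PySem.Dict.contains, List.any_eq_false] using h

theorem pvGetD_of_not_contains {ν : Type} (d : PySem.Dict String ν) (k : String) (v : ν)
    (h : PySem.Dict.contains d k = false) : PySem.Dict.getD d k v = v := by
  have hf : d.items.find? (fun p => p.1 == k) = none :=
    List.find?_eq_none.mpr (pvContains_false_forall d k h)
  simp [PySem.Dict.getD, PySem.Dict.get?, hf]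

theorem pvEnsure_eq {ν : Type} (d : PySem.Dict String ν) (k : String) (v : ν) :
    (if PySem.Dict.contains d k then d else PySem.Dict.insert d k v) =
      PySem.Dict.setdefault d k v := by
  cases hc : PySem.Dict.contains d k <;>
    simp [hc, PySem.Dict.insert, PySem.Dict.setdefault]

theorem pvInsert_modify_eq {ν : Type} (d : PySem.Dict String ν) (k : String) (v0 : ν)
    (f : ν → ν) :
    PySem.Dict.insert d k (f (PySem.Dict.getD d k v0)) =
      PySem.Dict.modify (PySem.Dict.setdefault d k v0) k v0 f := by
  cases hc : PySem.Dict.contains d k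
  · have hall := pvContains_false_forall d k hc
    have hget : PySem.Dict.getD d k v0 = v0 := pvGetD_of_not_contains d k v0 hc
    have hsd : PySem.Dict.setdefault d k v0 = ⟨d.items ++ [(k, v0)]⟩ := by
      simp [PySem.Dict.setdefault, hc]
    have hcd : PySem.Dict.contains (⟨d.items ++ [(k, v0)]⟩ : PySem.Dict String ν) k = true := by
      simp [PySem.Dict.contains]
    have hfind : (d.items ++ [(k, v0)]).find? (fun p => p.1 == k) = some (k, v0) := by
      rw [List.find?_append]
      rw [List.find?_eq_none.mpr hall]
      simp
    have hget2 : PySem.Dict.getD (⟨d.items ++ [(k, v0)]⟩ : PySem.Dict String ν) k v0 = v0 := by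
      simp [PySem.Dict.getD, PySem.Dict.get?, hfind]
    rw [hsd]
    show PySem.Dict.insert d k (f (PySem.Dict.getD d k v0)) =
      PySem.Dict.insert (⟨d.items ++ [(k, v0)]⟩ : PySem.Dict String ν) k
        (f (PySem.Dict.getD (⟨d.items ++ [(k, v0)]⟩ : PySem.Dict String ν) k v0))
    rw [hget, hget2]
    simp only [PySem.Dict.insert, hc, hcd, if_false, if_true, Bool.false_eq_true]
    congr 1
    rw [List.map_append]
    have hmap : d.items.map (fun p => if (p.1 == k) = true then (k, f v0) else p) = d.items :=
      (List.map_congr_left (fun p hp => if_neg (hall p hp))).trans (List.map_id _)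
    rw [hmap]
    simp
  · have hsd : PySem.Dict.setdefault d k v0 = d := by simp [PySem.Dict.setdefault, hc]
    rw [hsd]
    rfl

theorem pvDicts_eq (deps : List (String × List String)) : pvPreds deps = pvReverseDeps deps := by
  unfold pvPreds pvReverseDeps
  congr 1
  funext acc p
  dsimp only
  rw [← pvEnsure_eq]
  congr 1
  funext pr s
  exact (pvInsert_modify_eq pr s PySem.Set.empty (fun t => PySem.Set.add t p.1)).symm

-- B's comprehension is A's find_start_labels fold
theorem pvStartFold (l : List (String × PySem.Set String)) :
    ∀ acc, l.foldl (fun acc p => if p.2 = ([] : List String) then acc ++ [p.1] else acc) acc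
      = acc ++ (l.filter (fun p => p.2.isEmpty)).map Prod.fst := by
  induction l with
  | nil => intro acc; simp
  | cons p l ih =>
      intro acc
      simp only [List.foldl_cons, List.filter_cons]
      by_cases hp : p.2 = ([] : List String)
      · rw [if_pos hp, ih]
        have he : p.2.isEmpty = true := by simp [hp]
        simp [he]
      · rw [if_neg hp, ih]
        have he : p.2.isEmpty = false := by simpa [List.isEmpty_iff] using hp
        simp [he]

theorem pvStartLabels_eq (rd : PySem.Dict String (PySem.Set String)) :
    (rd.items.filter (fun p => p.2.isEmpty)).map Prod.fst = pvStartLabels rd := by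
  unfold pvStartLabels
  rw [pvStartFold]
  simp

theorem pvSortFold_perm : ∀ (l acc : List String),
    (l.foldl (fun acc x => pvInsort (fun a b : String => a < b) x acc) acc).Perm (l ++ acc) := by
  intro l
  induction l with
  | nil => intro acc; simp
  | cons x l ih =>
      intro acc
      simp only [List.foldl_cons]
      refine (ih _).trans ?_
      refine (List.Perm.append_left l (pvInsort_perm _ x acc)).trans ?_
      simp

theorem pvSortFold_sorted : ∀ (l acc : List String),
    acc.Pairwise (fun a b : String => ¬ b < a) →
    (l.foldl (fun acc x => pvInsort (fun a b : String => a < b) x acc) acc).Pairwise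
      (fun a b : String => ¬ b < a) := by
  intro l
  induction l with
  | nil => intro acc h; simp only [List.foldl_nil]; exact h
  | cons x l ih =>
      intro acc h
      simp only [List.foldl_cons]
      exact ih _ (pvInsort_pairwise _ pvLtS_asymm pvLtS_cotrans x acc h)

theorem pvRangeLen (n : Int) : ((PySem.List.pyRange 0 n 1).length : Int) = max n 0 := by
  simp only [PySem.List.pyRange]
  norm_num

theorem pv_top (deps : List (String × List String)) (n cost : Int) :
    determine_construction_time deps n cost = determine_construction_time_alt deps n cost := by
  unfold determine_construction_time determine_construction_time_alt
  simp only [pvDicts_eq, pvStartLabels_eq]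
  apply pvLoop_sim deps cost
  · rw [pvRangeLen]
    omega
  · exact pvSortFold_sorted _ [] List.Pairwise.nil
  · refine List.Perm.symm ?_
    simpa using pvSortFold_perm (pvStartLabels (pvReverseDeps deps)) []
  · exact List.Pairwise.nil
  · simp

-- ===== VERDICT (by name: the statement is the Claim_ definition above) =====
theorem determine_construction_time_spec : Claim_equal_determine_construction_time := by
  intro deps n cost _ _
  unfold Spec_determine_construction_time
  exact pv_top deps n cost
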